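-- pv_equiv track=rewrite | github.com/TextLayer/textlayer-interview | services/agents/financial_agent.py | _query_expects_data
-- ===== SOURCE A (Python) =====
-- def _query_expects_data(user_query: str) -> bool:
--     """Determine if the user query expects to return data"""
--     query_lower = user_query.lower()
--
--     # Queries that typically expect data
--     data_expecting_keywords = [
--         "show", "list", "find", "get", "what", "which", "how much", "how many",
--         "total", "sum", "count", "average", "top", "bottom", "revenue", "sales",
--         "profit", "customers", "products", "accounts"
--     ]
--
--     for keyword in data_expecting_keywords:
--         if keyword in query_lower:
--             return True
--
--     return False
-- ===== SOURCE B (Python) =====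
-- def _query_expects_data(user_query: str) -> bool:
--     """Determine if the user query expects to return data"""
--     query_lower = user_query.lower()
--
--     data_expecting_keywords = [
--         "show", "list", "find", "get", "what", "which", "how much", "how many",
--         "total", "sum", "count", "average", "top", "bottom", "revenue", "sales",
--         "profit", "customers", "products", "accounts"
--     ]
--
--     # single left-to-right scan: at each position try every keyword as a prefix
--     return any(
--         query_lower.startswith(keyword, i)
--         for i in range(len(query_lower) + 1)
--         for keyword in data_expecting_keywords
--     )
-- ===== Notes on version B (the rewrite author's own statement) =====
-- stated objective: alternative
-- what changed: Replaced the per-keyword loop of independent substring searches with a single left-to-right scan over the query that tries every keyword as a prefix at each position (regex-alternation style).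
import Mathlib
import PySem

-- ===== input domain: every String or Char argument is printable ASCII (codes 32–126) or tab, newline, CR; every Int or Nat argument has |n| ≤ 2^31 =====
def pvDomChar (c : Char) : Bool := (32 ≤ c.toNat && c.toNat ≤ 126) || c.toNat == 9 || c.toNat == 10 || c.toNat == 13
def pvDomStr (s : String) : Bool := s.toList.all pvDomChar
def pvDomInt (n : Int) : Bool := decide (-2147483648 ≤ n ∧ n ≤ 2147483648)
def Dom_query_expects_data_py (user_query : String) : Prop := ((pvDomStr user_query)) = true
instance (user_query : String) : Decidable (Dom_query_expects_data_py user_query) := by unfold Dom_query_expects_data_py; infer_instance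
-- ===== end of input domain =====

-- B replaces A's loop of k independent substring searches by one left-to-right scan
-- trying every keyword as a prefix at each position (alternative decomposition, same results).

def pvKeywords : List String :=
  ["show", "list", "find", "get", "what", "which", "how much", "how many",
   "total", "sum", "count", "average", "top", "bottom", "revenue", "sales",
   "profit", "customers", "products", "accounts"]

-- ===== PORT A =====
-- the 'for keyword in …: if keyword in query_lower: return True' loop
def pvLoopA (q : List Char) : List String → Bool
  | [] => false
  | k :: rest => if PySem.Chars.isIn k.toList q then true else pvLoopA q rest

def query_expects_data_py (user_query : String) : Bool :=
  pvLoopA (PySem.Chars.lower user_query.toList) pvKeywords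

-- ===== PORT B =====
def query_expects_data_py_alt (user_query : String) : Bool :=
  let q := PySem.Chars.lower user_query.toList
  (List.range (q.length + 1)).any fun j =>
    pvKeywords.any fun k => k.toList.isPrefixOf (q.drop j)

-- ===== PRECONDITION & SPEC =====
def Spec_query_expects_data_py (user_query : String) (out : Bool) : Prop := out = query_expects_data_py_alt user_query
instance (user_query : String) (out : Bool) : Decidable (Spec_query_expects_data_py user_query out) := by unfold Spec_query_expects_data_py; infer_instance

-- ===== CLAIM (what is proved, stated in full; the proofs are below) =====
def Claim_equal_query_expects_data_py : Prop := ∀ (user_query : String), Dom_query_expects_data_py user_query → Spec_query_expects_data_py user_query (query_expects_data_py user_query)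

-- ===== LEMMAS AND PROOFS =====

-- A's early-return loop is List.any over the keywords
theorem pvLoopA_eq_any (q : List Char) (ks : List String) :
    pvLoopA q ks = ks.any (fun k => PySem.Chars.isIn k.toList q) := by
  induction ks with
  | nil => rfl
  | cons k rest ih =>
    simp only [pvLoopA, List.any_cons, ih]
    by_cases h : PySem.Chars.isIn k.toList q = true <;> simp [h]

-- a prefix of some suffix is a prefix of a suffix with index ≤ length
theorem pvDrop_bound {α : Type} (q sub : List α) (j : ℕ) (h : sub <+: q.drop j) :
    ∃ i < q.length + 1, sub <+: q.drop i := by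
  by_cases hj : j ≤ q.length
  · exact ⟨j, by omega, h⟩
  · refine ⟨q.length, by omega, ?_⟩
    rw [List.drop_eq_nil_of_le (le_refl _)]
    rwa [List.drop_eq_nil_of_le (by omega)] at h

theorem pvMain (q : List Char) :
    pvLoopA q pvKeywords
      = (List.range (q.length + 1)).any fun j =>
          pvKeywords.any fun k => k.toList.isPrefixOf (q.drop j) := by
  rw [pvLoopA_eq_any]
  rcases Bool.eq_false_or_eq_true
      ((List.range (q.length + 1)).any fun j =>
        pvKeywords.any fun k => k.toList.isPrefixOf (q.drop j)) with hB | hB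
  · rw [hB]
    simp only [List.any_eq_true, List.mem_range, List.isPrefixOf_iff_prefix] at hB ⊢
    obtain ⟨j, _, k, hk, hpre⟩ := hB
    refine ⟨k, hk, ?_⟩
    rw [← PySem.Chars.exists_prefix_drop_iff_isIn]
    exact ⟨j, hpre⟩
  · rw [hB]
    simp only [List.any_eq_false, List.mem_range, List.any_eq_true,
      List.isPrefixOf_iff_prefix, not_exists, not_and] at hB ⊢
    intro k hk hinf
    obtain ⟨j, hpre⟩ := (PySem.Chars.exists_prefix_drop_iff_isIn k.toList q).2 hinf
    obtain ⟨i, hi, hpre'⟩ := pvDrop_bound q k.toList j hpre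
    exact hB i hi k hk hpre'

-- ===== VERDICT (by name: the statement is the Claim_ definition above) =====
theorem query_expects_data_py_spec : Claim_equal_query_expects_data_py := by
  intro u _
  unfold Spec_query_expects_data_py query_expects_data_py query_expects_data_py_alt
  exact pvMain (PySem.Chars.lower u.toList)
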